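-- pv_equiv track=rewrite | github.com/hendricklee09/eueler | p5.py | mergeFactor
-- ===== SOURCE A (Python) =====
-- def mergeFactor(p1,p2):
-- 	m=max(max(p1),max(p2))
-- 	p3=[]
-- 	for x in range(2,m+1):
-- 		c1=p1.count(x)
-- 		c2=p2.count(x)
-- 		p0=[x]*max(c1,c2)
-- 		p3.extend(p0)
-- 	return(p3)
-- ===== SOURCE B (Python) =====
-- def mergeFactor(p1, p2):
--     # count each value once per list, then emit sorted distinct values >= 2
--     c1 = {}
--     for x in p1:
--         c1[x] = c1.get(x, 0) + 1
--     c2 = {}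
--     for x in p2:
--         c2[x] = c2.get(x, 0) + 1
--     out = []
--     for x in sorted(set(p1 + p2)):
--         if x >= 2:
--             out.extend([x] * max(c1.get(x, 0), c2.get(x, 0)))
--     return out
-- ===== Notes on version B (the rewrite author's own statement) =====
-- stated objective: faster
-- what changed: A scans both whole lists with .count for every integer in range(2, max+1); B builds one frequency dict per list in a single pass each and emits the sorted distinct values >= 2, removing both the range sweep and the repeated list scans.
import Mathlib
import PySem

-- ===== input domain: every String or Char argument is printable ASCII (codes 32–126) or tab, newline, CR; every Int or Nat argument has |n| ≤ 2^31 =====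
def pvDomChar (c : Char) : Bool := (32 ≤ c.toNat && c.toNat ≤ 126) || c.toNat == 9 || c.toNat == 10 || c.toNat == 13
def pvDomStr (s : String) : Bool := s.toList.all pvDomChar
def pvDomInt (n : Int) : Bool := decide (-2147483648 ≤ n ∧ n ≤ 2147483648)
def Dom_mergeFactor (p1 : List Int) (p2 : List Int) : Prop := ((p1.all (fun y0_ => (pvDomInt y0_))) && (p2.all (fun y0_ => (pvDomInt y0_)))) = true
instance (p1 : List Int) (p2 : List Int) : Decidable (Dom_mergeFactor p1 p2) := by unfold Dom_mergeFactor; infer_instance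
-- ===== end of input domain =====

-- B replaces A's sweep over range(2, max+1) with per-list counting dicts and a
-- sorted pass over the distinct values; equal return value proved on nonempty inputs.

-- ===== PORT A =====
def mergeFactor (p1 : List Int) (p2 : List Int) : List Int :=
  match PySem.List.max? p1 (fun y => y), PySem.List.max? p2 (fun y => y) with
  | some m1, some m2 =>
      let m := max m1 m2
      (PySem.List.pyRange 2 (m + 1) 1).foldl (fun p3 x =>
        let c1 : Int := PySem.List.count p1 x
        let c2 : Int := PySem.List.count p2 x
        let p0 := PySem.List.pyRepeat [x] (max c1 c2)
        p3 ++ p0) []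
  | _, _ => []  -- unreachable under Pre_ (Python raises ValueError on an empty list)

-- ===== PORT B =====
def mergeFactor_alt (p1 : List Int) (p2 : List Int) : List Int :=
  let c1 := p1.foldl (fun d x => PySem.Dict.insert d x (PySem.Dict.getD d x 0 + 1)) PySem.Dict.empty
  let c2 := p2.foldl (fun d x => PySem.Dict.insert d x (PySem.Dict.getD d x 0 + 1)) PySem.Dict.empty
  (PySem.List.sorted (PySem.Set.ofList (p1 ++ p2)) (fun x => x) false).foldl
    (fun out x =>
      if 2 ≤ x then
        out ++ PySem.List.pyRepeat [x] (max (PySem.Dict.getD c1 x 0) (PySem.Dict.getD c2 x 0))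
      else out) []

-- ===== PRECONDITION & SPEC =====
-- Pre_ excludes an empty p1 or p2, on which Python A raises ValueError from max([]).
def Pre_mergeFactor (p1 : List Int) (p2 : List Int) : Prop := p1 ≠ [] ∧ p2 ≠ []
instance (p1 : List Int) (p2 : List Int) : Decidable (Pre_mergeFactor p1 p2) := by unfold Pre_mergeFactor; infer_instance
def pvWitness_mergeFactor : List Int × List Int := ([2, 2, 3], [2, 5])

def Spec_mergeFactor (p1 : List Int) (p2 : List Int) (out : List Int) : Prop := out = mergeFactor_alt p1 p2
instance (p1 : List Int) (p2 : List Int) (out : List Int) : Decidable (Spec_mergeFactor p1 p2 out) := by unfold Spec_mergeFactor; infer_instance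

-- ===== CLAIM (what is proved, stated in full; the proofs are below) =====
def Claim_equal_mergeFactor : Prop := ∀ (p1 : List Int) (p2 : List Int), Dom_mergeFactor p1 p2 → Pre_mergeFactor p1 p2 → Spec_mergeFactor p1 p2 (mergeFactor p1 p2)

-- ===== LEMMAS AND PROOFS =====

-- flatMap over a list equals flatMap over its filter when g is empty off the filter
theorem pv_flatMap_filter {α β : Type} (p : α → Bool) (g : α → List β)
    (l : List α) (h : ∀ x ∈ l, p x = false → g x = []) :
    l.flatMap g = (l.filter p).flatMap g := by
  induction l with
  | nil => rfl
  | cons a t ih =>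
    simp only [List.flatMap_cons, List.filter_cons]
    cases hpa : p a with
    | true => simp [List.flatMap_cons, ih (fun x hx => h x (List.mem_cons_of_mem a hx))]
    | false => simp [h a (List.mem_cons_self) hpa, ih (fun x hx => h x (List.mem_cons_of_mem a hx))]

-- the ascending range of A, restricted to present values, IS B's sorted distinct-value list restricted to ≥ 2
theorem pv_filter_eq (p1 p2 : List Int) (M : Int) (hub : ∀ x ∈ p1 ++ p2, x ≤ M) :
    (PySem.List.pyRange 2 (M + 1) 1).filter (fun x => decide (x ∈ p1 ++ p2))
      = (PySem.List.sorted (PySem.Set.ofList (p1 ++ p2)) (fun x => x) false).filter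
          (fun x => decide (2 ≤ x)) := by
  have hpw1 : ((PySem.List.pyRange 2 (M + 1) 1).filter (fun x => decide (x ∈ p1 ++ p2))).Pairwise (· < ·) :=
    (PySem.List.pairwise_lt_pyRange_one 2 (M + 1)).filter _
  have hpw2 : ((PySem.List.sorted (PySem.Set.ofList (p1 ++ p2)) (fun x => x) false).filter
      (fun x => decide (2 ≤ x))).Pairwise (· < ·) :=
    (PySem.List.sorted_ofList_pairwise_lt (p1 ++ p2)).filter _
  refine List.Perm.eq_of_pairwise (fun a b _ _ hab hba => absurd hba (not_lt_of_gt hab)) hpw1 hpw2 ?_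
  refine (List.perm_ext_iff_of_nodup (hpw1.imp ?_) (hpw2.imp ?_)).mpr ?_
  · exact fun h => ne_of_lt h
  · exact fun h => ne_of_lt h
  · intro x
    simp only [List.mem_filter, PySem.List.mem_pyRange_one, PySem.List.mem_sorted,
      PySem.Set.mem_ofList, decide_eq_true_eq]
    constructor
    · rintro ⟨⟨hx2, _⟩, hmem⟩; exact ⟨hmem, hx2⟩
    · rintro ⟨hmem, hx2⟩
      exact ⟨⟨hx2, by have := hub x hmem; omega⟩, hmem⟩

-- ===== VERDICT (by name: the statement is the Claim_ definition above) =====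
theorem mergeFactor_spec : Claim_equal_mergeFactor := by
  intro p1 p2 _ hpre
  obtain ⟨h1, h2⟩ := hpre
  unfold Spec_mergeFactor mergeFactor mergeFactor_alt
  obtain ⟨m1, hm1⟩ : ∃ m, PySem.List.max? p1 (fun y => y) = some m := by
    cases hc : PySem.List.max? p1 (fun y => y) with
    | none => exact absurd ((PySem.List.max?_eq_none_iff p1 _).mp hc) h1
    | some m => exact ⟨m, rfl⟩
  obtain ⟨m2, hm2⟩ : ∃ m, PySem.List.max? p2 (fun y => y) = some m := by
    cases hc : PySem.List.max? p2 (fun y => y) with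
    | none => exact absurd ((PySem.List.max?_eq_none_iff p2 _).mp hc) h2
    | some m => exact ⟨m, rfl⟩
  rw [hm1, hm2]
  simp only [PySem.Dict.foldl_insert_getD_add_one_eq_counter]
  -- the common per-value block
  set G : Int → List Int := fun x =>
    List.replicate (max ((List.count x p1 : Int)) ((List.count x p2 : Int))).toNat x with hG
  -- A's loop is a flatMap of G over the range
  have hA : (PySem.List.pyRange 2 (max m1 m2 + 1) 1).foldl (fun p3 x =>
        p3 ++ PySem.List.pyRepeat [x]
          (max ((PySem.List.count p1 x : Int)) ((PySem.List.count p2 x : Int)))) []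
      = (PySem.List.pyRange 2 (max m1 m2 + 1) 1).flatMap G := by
    rw [PySem.List.foldl_append_eq_flatMap]
    simp [hG, PySem.List.pyRepeat_singleton, PySem.List.count_eq]
  -- B's loop is a flatMap of the guarded block over the sorted distinct values
  set S := PySem.List.sorted (PySem.Set.ofList (p1 ++ p2)) (fun x => x) false with hS
  have hB : S.foldl (fun out x =>
        if 2 ≤ x then
          out ++ PySem.List.pyRepeat [x]
            (max (PySem.Dict.getD (PySem.Dict.counter p1) x 0) (PySem.Dict.getD (PySem.Dict.counter p2) x 0))
        else out) []
      = S.flatMap (fun x => if 2 ≤ x then G x else []) := by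
    have hbody : (fun (out : List Int) (x : Int) =>
          if 2 ≤ x then
            out ++ PySem.List.pyRepeat [x]
              (max (PySem.Dict.getD (PySem.Dict.counter p1) x 0) (PySem.Dict.getD (PySem.Dict.counter p2) x 0))
          else out)
        = fun out x => out ++ (if 2 ≤ x then G x else []) := by
      funext out x
      split <;> simp [hG, PySem.Dict.getD_counter, PySem.List.pyRepeat_singleton]
    rw [hbody, PySem.List.foldl_append_eq_flatMap]
    simp
  rw [hA, hB]
  -- drop the values absent from both lists from A's range, and the values < 2 from B's list
  have hGnil : ∀ x, x ∉ p1 ++ p2 → G x = [] := by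
    intro x hx
    simp only [List.mem_append, not_or] at hx
    simp [hG, List.count_eq_zero.mpr hx.1, List.count_eq_zero.mpr hx.2]
  rw [pv_flatMap_filter (fun x => decide (x ∈ p1 ++ p2)) G _
        (fun x _ hf => hGnil x (by simpa using hf)),
      pv_flatMap_filter (fun x => decide (2 ≤ x)) _ S
        (fun x _ hf => by simp only [decide_eq_false_iff_not] at hf; simp [hf])]
  -- on the filtered range the guard is true
  have hfilter := pv_filter_eq p1 p2 (max m1 m2) (by
    intro x hx
    rcases List.mem_append.mp hx with hx1 | hx2
    · exact le_trans (PySem.List.max?_isMax hm1 x hx1) (le_max_left m1 m2)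
    · exact le_trans (PySem.List.max?_isMax hm2 x hx2) (le_max_right m1 m2))
  rw [← hS] at hfilter
  rw [hfilter]
  apply List.flatMap_congr
  intro x hx
  have : 2 ≤ x := by
    have := (List.mem_filter.mp hx).2
    simpa using this
  simp [this]
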